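-- pv_equiv track=rewrite | github.com/gizmolotry/lojbanhypop | archive/exports/ablation_export_bundle_20260329_full/scripts/run_m3_18_decoder_reentry_resume.py | _loop_flag
-- ===== SOURCE A (Python) =====
-- def _loop_flag(token_ids: list[int]) -> bool:
--     if len(token_ids) < 3:
--         return False
--     if len(set(token_ids)) <= max(1, len(token_ids) // 2):
--         return True
--     for n in (1, 2):
--         if len(token_ids) < n * 2:
--             continue
--         seen: set[tuple[int, ...]] = set()
--         for i in range(0, len(token_ids) - n + 1):
--             gram = tuple(int(t) for t in token_ids[i : i + n])
--             if gram in seen: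
--                 return True
--             seen.add(gram)
--     return False
-- ===== SOURCE B (Python) =====
-- def _loop_flag(token_ids: list[int]) -> bool:
--     return len(token_ids) >= 3 and len(set(token_ids)) < len(token_ids)
-- ===== Notes on version B (the rewrite author's own statement) =====
-- stated objective: simpler
-- what changed: Replaces the uniqueness-ratio test plus the two n-gram (unigram and bigram) scan loops with a single closed-form duplicate test: for length >= 3 the flag is exactly 'some token value repeats', since the ratio branch firing implies a duplicate, the n=1 scan detects exactly duplicates, and the bigram scan can only fire when a token repeats.
import Mathlib
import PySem

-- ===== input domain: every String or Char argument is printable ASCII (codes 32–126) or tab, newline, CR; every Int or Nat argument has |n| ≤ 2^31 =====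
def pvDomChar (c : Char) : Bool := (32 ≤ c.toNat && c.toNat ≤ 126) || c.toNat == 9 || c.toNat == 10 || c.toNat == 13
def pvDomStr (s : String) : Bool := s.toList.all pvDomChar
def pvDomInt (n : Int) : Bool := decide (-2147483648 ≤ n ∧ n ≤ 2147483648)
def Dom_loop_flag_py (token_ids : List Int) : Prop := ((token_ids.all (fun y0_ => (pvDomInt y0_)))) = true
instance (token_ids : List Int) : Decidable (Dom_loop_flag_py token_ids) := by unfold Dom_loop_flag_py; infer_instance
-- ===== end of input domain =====

-- B replaces A's uniqueness-ratio branch and its two n-gram scan loops with the single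
-- closed-form duplicate test "length >= 3 and some token value repeats" (objective: simpler).


-- ===== PORT A =====
-- gram = tuple(int(t) for t in token_ids[i : i + n]); the inputs are ints, so int(t) = t and the
-- gram is the slice token_ids[i:i+n] itself (modelled as a List Int instead of a tuple).
def pvGram (xs : List Int) (n i : Nat) : List Int :=
  PySem.List.slice xs (some (i : Int)) (some ((i : Int) + (n : Int)))

-- the inner 'for i in range(0, len - n + 1)' loop with its early 'return True' and growing 'seen' set
def pvScanGrams (xs : List Int) (n : Nat) : List Nat → PySem.Set (List Int) → Bool
  | [], _ => false
  | i :: rest, seen =>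
    let gram := pvGram xs n i
    if PySem.Set.contains seen gram then true
    else pvScanGrams xs n rest (PySem.Set.add seen gram)

def loop_flag_py (token_ids : List Int) : Bool :=
  if token_ids.length < 3 then false
  else if (PySem.Set.ofList token_ids).length ≤ max 1 (token_ids.length / 2) then true
  else
    -- 'for n in (1, 2)' unrolled; a 'return True' inside either scan makes the result true
    (if token_ids.length < 1 * 2 then false
     else pvScanGrams token_ids 1 (List.range (token_ids.length - 1 + 1)) PySem.Set.empty)
    ||
    (if token_ids.length < 2 * 2 then false
     else pvScanGrams token_ids 2 (List.range (token_ids.length - 2 + 1)) PySem.Set.empty)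

-- ===== PORT B =====
def loop_flag_py_alt (token_ids : List Int) : Bool :=
  decide (3 ≤ token_ids.length) && decide ((PySem.Set.ofList token_ids).length < token_ids.length)

-- ===== PRECONDITION & SPEC =====
def Spec_loop_flag_py (token_ids : List Int) (out : Bool) : Prop := out = loop_flag_py_alt token_ids
instance (token_ids : List Int) (out : Bool) : Decidable (Spec_loop_flag_py token_ids out) := by unfold Spec_loop_flag_py; infer_instance

-- ===== CLAIM (what is proved, stated in full; the proofs are below) =====
def Claim_equal_loop_flag_py : Prop := ∀ (token_ids : List Int), Dom_loop_flag_py token_ids → Spec_loop_flag_py token_ids (loop_flag_py token_ids)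

-- ===== LEMMAS AND PROOFS =====

-- the scan returns true iff some gram is already in `seen` or the gram sequence has a duplicate
lemma pvScanGrams_true_iff (xs : List Int) (n : Nat) :
    ∀ (is : List Nat) (seen : PySem.Set (List Int)),
      pvScanGrams xs n is seen = true ↔
        (∃ i ∈ is, pvGram xs n i ∈ seen) ∨ ¬ (is.map (pvGram xs n)).Nodup := by
  intro is
  induction is with
  | nil => intro seen; simp [pvScanGrams]
  | cons i rest ih =>
    intro seen
    by_cases hc : pvGram xs n i ∈ seen
    · have hcc : PySem.Set.contains seen (pvGram xs n i) = true :=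
        (PySem.Set.contains_iff seen _).mpr hc
      simp only [pvScanGrams, hcc, if_true]
      constructor
      · intro _; exact Or.inl ⟨i, by simp, hc⟩
      · intro _; trivial
    · have hcc : PySem.Set.contains seen (pvGram xs n i) = false := by
        cases h : PySem.Set.contains seen (pvGram xs n i)
        · rfl
        · exact absurd ((PySem.Set.contains_iff seen _).mp h) hc
      simp only [pvScanGrams, hcc, Bool.false_eq_true, if_false]
      rw [ih]
      simp only [PySem.Set.mem_add, List.map_cons, List.nodup_cons, List.mem_map, List.mem_cons]
      constructor
      · rintro (⟨j, hj, hmem | heq⟩ | hnd)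
        · exact Or.inl ⟨j, Or.inr hj, hmem⟩
        · exact Or.inr (fun hno => hno.1 ⟨j, hj, heq⟩)
        · exact Or.inr (fun hno => hnd hno.2)
      · rintro (⟨j, hj | hj, hmem⟩ | hnd)
        · exact absurd (hj ▸ hmem) hc
        · exact Or.inl ⟨j, hj, Or.inl hmem⟩
        · by_cases hin : ∃ j ∈ rest, pvGram xs n j = pvGram xs n i
          · obtain ⟨j, hj, he⟩ := hin
            exact Or.inl ⟨j, hj, Or.inr he⟩
          · exact Or.inr (fun hnd2 => hnd ⟨fun hm => hin hm, hnd2⟩)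

lemma pvScanGrams_empty_iff (xs : List Int) (n : Nat) (is : List Nat) :
    pvScanGrams xs n is PySem.Set.empty = true ↔ ¬ (is.map (pvGram xs n)).Nodup := by
  rw [pvScanGrams_true_iff]
  simp [PySem.Set.empty]

lemma pvGram_one (xs : List Int) (i : Nat) (h : i < xs.length) :
    pvGram xs 1 i = [xs[i]] := by
  unfold pvGram
  rw [show ((i : Int) + ((1:Nat) : Int)) = ((i + 1 : Nat) : Int) by push_cast; ring,
      PySem.List.slice_natCast, show i + 1 - i = 1 by omega, List.drop_eq_getElem_cons h]
  rfl

lemma pvGram_two (xs : List Int) (i : Nat) (h : i + 2 ≤ xs.length) :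
    pvGram xs 2 i = [xs[i], xs[i + 1]] := by
  unfold pvGram
  rw [show ((i : Int) + ((2:Nat) : Int)) = ((i + 2 : Nat) : Int) by push_cast; ring,
      PySem.List.slice_natCast, show i + 2 - i = 2 by omega,
      List.drop_eq_getElem_cons (show i < xs.length by omega),
      List.drop_eq_getElem_cons (show i + 1 < xs.length by omega)]
  rfl

-- the unigram sequence is xs itself, elementwise wrapped in singletons
lemma map_gram_one (xs : List Int) :
    (List.range xs.length).map (pvGram xs 1) = xs.map (fun x => [x]) := by
  apply List.ext_getElem
  · simp
  · intro k h1 h2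
    simp only [List.getElem_map, List.getElem_range]
    exact pvGram_one xs k (by simpa using h2)

lemma gram_one_nodup_iff (xs : List Int) :
    ((List.range xs.length).map (pvGram xs 1)).Nodup ↔ xs.Nodup := by
  rw [map_gram_one]
  exact List.nodup_map_iff (fun a b h => by simpa using h)

lemma gram_two_nodup (xs : List Int) (hd : xs.Nodup) :
    ((List.range (xs.length - 2 + 1)).map (pvGram xs 2)).Nodup := by
  by_cases hlen : 2 ≤ xs.length
  · apply List.Nodup.map_on _ (List.nodup_range)
    intro a ha b hb he
    have ha' : a + 2 ≤ xs.length := by simp at ha; omega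
    have hb' : b + 2 ≤ xs.length := by simp at hb; omega
    rw [pvGram_two xs a ha', pvGram_two xs b hb'] at he
    simp only [List.cons.injEq] at he
    exact (List.Nodup.getElem_inj_iff hd).mp he.1
  · rw [show xs.length - 2 + 1 = 1 by omega]
    simp [List.range_succ]

lemma ofList_length_lt_of_not_nodup (xs : List Int) (h : ¬ xs.Nodup) :
    (PySem.Set.ofList xs).length < xs.length := by
  rcases lt_or_eq_of_le (PySem.Set.length_ofList_le xs) with h2 | h2
  · exact h2
  · exfalso; apply h
    have hn := PySem.Set.nodup_ofList xs
    have hsub : List.Subperm (PySem.Set.ofList xs) xs :=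
      List.subperm_of_subset hn (fun y hy => (PySem.Set.mem_ofList xs y).mp hy)
    have hp := List.Subperm.perm_of_length_le hsub (le_of_eq h2.symm)
    exact (List.Perm.nodup_iff hp).mp hn

-- ===== VERDICT (by name: the statement is the Claim_ definition above) =====
theorem loop_flag_py_spec : Claim_equal_loop_flag_py := by
  intro xs _
  unfold Spec_loop_flag_py loop_flag_py loop_flag_py_alt
  by_cases h3 : xs.length < 3
  · rw [if_pos h3]
    simp [show ¬ 3 ≤ xs.length by omega]
  · have h3' : 3 ≤ xs.length := by omega
    rw [if_neg h3]
    by_cases hd : xs.Nodup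
    · -- no duplicate: A's ratio branch is off, both scans find nothing; B is false
      have hself : PySem.Set.ofList xs = xs := PySem.Set.ofList_eq_self_of_nodup xs hd
      have hratio : ¬ (PySem.Set.ofList xs).length ≤ max 1 (xs.length / 2) := by
        rw [hself]; omega
      have hscan1 : pvScanGrams xs 1 (List.range (xs.length - 1 + 1)) PySem.Set.empty = false := by
        rw [show xs.length - 1 + 1 = xs.length by omega]
        cases h : pvScanGrams xs 1 (List.range xs.length) PySem.Set.empty
        · rfl
        · exact absurd ((gram_one_nodup_iff xs).mpr hd) ((pvScanGrams_empty_iff xs 1 _).mp h)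
      have hscan2 : pvScanGrams xs 2 (List.range (xs.length - 2 + 1)) PySem.Set.empty = false := by
        cases h : pvScanGrams xs 2 (List.range (xs.length - 2 + 1)) PySem.Set.empty
        · rfl
        · exact absurd (gram_two_nodup xs hd) ((pvScanGrams_empty_iff xs 2 _).mp h)
      rw [if_neg hratio, hscan1, hscan2, hself]
      simp
    · -- a duplicate exists: B is true; A returns true via the ratio branch or the n=1 scan
      have hBlt := ofList_length_lt_of_not_nodup xs hd
      by_cases hratio : (PySem.Set.ofList xs).length ≤ max 1 (xs.length / 2)
      · rw [if_pos hratio]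
        simp [h3', hBlt]
      · have hscan1 : pvScanGrams xs 1 (List.range (xs.length - 1 + 1)) PySem.Set.empty = true := by
          rw [show xs.length - 1 + 1 = xs.length by omega, pvScanGrams_empty_iff,
              gram_one_nodup_iff]
          exact hd
        rw [if_neg hratio, if_neg (show ¬ xs.length < 1 * 2 by omega), hscan1]
        simp [h3', hBlt]
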